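-- pv_equiv track=rewrite | github.com/RafaelPiloto10/Coding-Challenges | StringIncrementer/py/solution.py | increment_string
-- ===== SOURCE A (Python) =====
-- def increment_string(strng):
--     if len(strng) == 0: return '1'
--     if not strng[-1].isdigit(): return strng + '1'
--     strIndex = len(strng)
--     if strIndex == 1: return str(int(strng) + 1)
--     for i in range(len(strng) - 1, 0, -1):
--         if not strng[i].isdigit():
--             break
--         strIndex -= 1
--
--     num = int(strng[strIndex if not strng.isdigit() else 0:]) + 1
--     adj = len(strng[strIndex if not strng.isdigit() else 0:]) - len(str(num))
--     strng = strng[:strIndex + (adj if adj > 0 else 0)] + str(num)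
--     return strng
-- ===== SOURCE B (Python) =====
-- def increment_string(strng):
--     chars = list(strng)
--     i = len(chars) - 1
--     while i >= 0 and chars[i].isdigit():
--         if chars[i] != '9':
--             chars[i] = chr(ord(chars[i]) + 1)
--             return ''.join(chars)
--         chars[i] = '0'
--         i -= 1
--     chars.insert(i + 1, '1')
--     return ''.join(chars)
-- ===== Notes on version B (the rewrite author's own statement) =====
-- stated objective: alternative
-- what changed: replaces A's parse-increment-reprint pipeline (backward index loop, int() on the digit suffix, str() and adj padding arithmetic) by in-place digit-wise carry propagation from the last character, never converting to an integer at all, fixing A's all-digit bug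
-- intended difference: on all-digit strings of length >= 2 A keeps the first digit in the prefix although int() already consumed the whole string, so A returns the increment with the leading digit duplicated, while B returns the plain intended increment (see the witness input '10'). — e.g. on increment_string("10"): A returns "111", B returns "11"
import Mathlib
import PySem

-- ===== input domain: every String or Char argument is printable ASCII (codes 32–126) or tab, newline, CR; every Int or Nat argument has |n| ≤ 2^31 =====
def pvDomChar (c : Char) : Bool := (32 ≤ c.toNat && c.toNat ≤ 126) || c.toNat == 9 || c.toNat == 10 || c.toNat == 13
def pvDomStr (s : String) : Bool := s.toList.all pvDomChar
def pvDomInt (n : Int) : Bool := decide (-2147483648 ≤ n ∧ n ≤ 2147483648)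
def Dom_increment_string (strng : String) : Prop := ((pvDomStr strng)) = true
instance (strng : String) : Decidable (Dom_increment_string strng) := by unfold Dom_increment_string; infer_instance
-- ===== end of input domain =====

-- B replaces A's parse-increment-reprint pipeline (backward index loop, int() on the digit
-- suffix, str(), adj padding arithmetic) by in-place digit-wise carry propagation from the
-- last character — no integer conversion at all (alternative; fixes A's all-digit bug).

-- ===== PORT A =====
-- the 'for i in range(len(strng)-1, 0, -1)' loop with its break, carrying strIndex;
-- strng[i] is always in range here, so the .getD ' ' default is never used (Python never raises)
def incLoopA (cs : List Char) : List Int → Nat → Nat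
  | [], si => si
  | i :: rest, si =>
    if PySem.Chars.isdigit ((PySem.List.pyGet? cs i).getD ' ') = false then si
    else incLoopA cs rest (si - 1)

-- int(s), ported by hand for A's call sites: A only ever calls int() on a NONEMPTY list of
-- ASCII digit characters '0'..'9' (no sign, no whitespace, no underscore), where Python's
-- int() is exactly this decimal fold; exact there.
def intDigits (cs : List Char) : Int :=
  ((cs.foldl (fun a c => a * 10 + (c.toNat - 48)) 0 : Nat) : Int)

def increment_string (strng : String) : String :=
  let cs := strng.toList
  if cs.length = 0 then "1"
  else if PySem.Chars.isdigit ((PySem.List.pyGet? cs (-1)).getD ' ') = false then strng ++ "1"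
  else if cs.length = 1 then PySem.Int.toStr (intDigits cs + 1)
  else
    let strIndex := incLoopA cs (PySem.List.pyRange ((cs.length : Int) - 1) 0 (-1)) cs.length
    let start : Int := if PySem.Str.strIsdigit strng = false then (strIndex : Int) else 0
    let suffix := PySem.List.slice cs (some start) none
    let num := intDigits suffix + 1
    let adj : Int := (suffix.length : Int) - (PySem.Int.toChars num).length
    String.ofList
      (PySem.List.slice cs none (some ((strIndex : Int) + (if 0 < adj then adj else 0)))
        ++ PySem.Int.toChars num)

-- ===== PORT B =====
-- Source B's backward while-loop with in-place writes, transcribed as structural recursion over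
-- the reversed character list: '9' becomes '0' and the carry moves left; a lower digit is
-- bumped with chr(ord(c)+1) and the loop returns; at a non-digit or the front, '1' is inserted.
def bLoop : List Char → List Char
  | [] => ['1']
  | c :: rest =>
    if PySem.Chars.isdigit c = true then
      if c = '9' then '0' :: bLoop rest
      else Char.ofNat (c.toNat + 1) :: rest
    else '1' :: c :: rest

def increment_string_alt (strng : String) : String :=
  String.ofList (bLoop strng.toList.reverse).reverse

-- ===== PRECONDITION & SPEC =====
-- on all-digit strings of length >= 2 A keeps the first digit in the prefix although int()
-- already consumed the whole string, so A returns the increment with the leading digit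
-- duplicated, while B returns the plain intended increment (see the witness input '10').
def D_increment_string (strng : String) : Prop :=
  2 ≤ strng.toList.length ∧ strng.toList.all PySem.Chars.isdigit = true
instance (strng : String) : Decidable (D_increment_string strng) := by
  unfold D_increment_string; infer_instance

def Spec_increment_string (strng : String) (out : String) : Prop :=
  ¬ D_increment_string strng → out = increment_string_alt strng
instance (strng : String) (out : String) : Decidable (Spec_increment_string strng out) := by
  unfold Spec_increment_string; infer_instance

def pvDiffWitness_increment_string : String := "10"
def pvDiffWitnessOut_increment_string : String × String := ("111", "11")

-- ===== CLAIM (what is proved, stated in full; the proofs are below) =====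
def Claim_unchanged_increment_string : Prop :=
  ∀ (strng : String), Dom_increment_string strng →
    Spec_increment_string strng (increment_string strng)
def Claim_changed_increment_string : Prop :=
  Dom_increment_string (pvDiffWitness_increment_string) ∧
  D_increment_string (pvDiffWitness_increment_string) ∧
  increment_string (pvDiffWitness_increment_string) = pvDiffWitnessOut_increment_string.1 ∧
  increment_string_alt (pvDiffWitness_increment_string) = pvDiffWitnessOut_increment_string.2 ∧
  pvDiffWitnessOut_increment_string.1 ≠ pvDiffWitnessOut_increment_string.2
def Claim_exact_increment_string : Prop :=
  ∀ (strng : String), Dom_increment_string strng → D_increment_string strng →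
    increment_string strng ≠ increment_string_alt strng

-- ===== LEMMAS AND PROOFS =====

-- ---- decimal-digit toolbox ----

-- the numeric value of one digit character
def digitN (c : Char) : Nat := c.toNat - 48

-- value of a least-significant-first digit list
def VR : List Char → Nat
  | [] => 0
  | c :: e => digitN c + 10 * VR e

-- str(n) for a natural n, as a character list
def tCN (n : Nat) : List Char := Nat.toDigits 10 n

lemma digit_enum (c : Char) (h : PySem.Chars.isdigit c = true) :
    c = '0' ∨ c = '1' ∨ c = '2' ∨ c = '3' ∨ c = '4' ∨
    c = '5' ∨ c = '6' ∨ c = '7' ∨ c = '8' ∨ c = '9' := by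
  unfold PySem.Chars.isdigit at h
  simp only [Bool.and_eq_true, decide_eq_true_eq] at h
  obtain ⟨h1, h2⟩ := h
  have h1' : 48 ≤ c.toNat := h1
  have h2' : c.toNat ≤ 57 := h2
  have hofn : Char.ofNat c.toNat = c := Char.ofNat_toNat c
  set n := c.toNat with hn
  interval_cases n <;> rw [← hofn] <;> simp

lemma digitN_le_nine (c : Char) (h : PySem.Chars.isdigit c = true) : digitN c ≤ 9 := by
  rcases digit_enum c h with rfl|rfl|rfl|rfl|rfl|rfl|rfl|rfl|rfl|rfl <;> decide

lemma intDigits_eq_VR (e : List Char) : intDigits e.reverse = ((VR e : Nat) : Int) := by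
  unfold intDigits
  congr 1
  induction e with
  | nil => rfl
  | cons c e ih =>
    rw [List.reverse_cons, List.foldl_append]
    simp only [List.foldl]
    rw [ih]
    simp only [VR, digitN]
    omega

lemma digitChar_digitN (c : Char) (h : PySem.Chars.isdigit c = true) :
    Nat.digitChar (digitN c) = c := by
  rcases digit_enum c h with rfl|rfl|rfl|rfl|rfl|rfl|rfl|rfl|rfl|rfl <;> decide

lemma digitChar_succ (c : Char) (h : PySem.Chars.isdigit c = true) (h9 : c ≠ '9') :
    Nat.digitChar (digitN c + 1) = Char.ofNat (c.toNat + 1) := by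
  rcases digit_enum c h with rfl|rfl|rfl|rfl|rfl|rfl|rfl|rfl|rfl|rfl <;> first | decide | exact absurd rfl h9

lemma VR_lt (e : List Char) (he : ∀ c ∈ e, PySem.Chars.isdigit c = true) :
    VR e < 10 ^ e.length := by
  induction e with
  | nil => decide
  | cons c e ih =>
    have hc := digitN_le_nine c (he c List.mem_cons_self)
    have := ih (fun x hx => he x (List.mem_cons_of_mem _ hx))
    simp only [VR, List.length_cons, pow_succ]
    omega

-- str(n) never prints the empty string
lemma toDigitsCore_length_ge (b : Nat) : ∀ (f n : Nat) (ds : List Char),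
    ds.length ≤ (Nat.toDigitsCore b f n ds).length := by
  intro f
  induction f with
  | zero => intro n ds; simp [Nat.toDigitsCore]
  | succ f ih =>
    intro n ds
    rw [Nat.toDigitsCore]
    by_cases h : n / b = 0
    · simp [h]
    · simp only [h, if_false]
      calc ds.length ≤ (Nat.digitChar (n % b) :: ds).length := by simp
        _ ≤ _ := ih _ _

lemma toDigits_ne_nil (b n : Nat) : Nat.toDigits b n ≠ [] := by
  apply List.ne_nil_of_length_pos
  rw [Nat.toDigits, Nat.toDigitsCore]
  by_cases h : n / b = 0
  · simp [h]
  · simp only [h, if_false]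
    have := toDigitsCore_length_ge b n (n / b) [Nat.digitChar (n % b)]
    simpa using Nat.lt_of_lt_of_le (by simp) this

lemma tCN_ne_nil (n : Nat) : tCN n ≠ [] := toDigits_ne_nil 10 n

-- PySem's str(n) on a natural number is Nat.toDigits
lemma toChars_natCast (m : Nat) : PySem.Int.toChars ((m : Nat) : Int) = tCN m := by
  unfold PySem.Int.toChars tCN
  rw [if_neg (by exact not_lt.mpr (Int.natCast_nonneg m))]
  simp

-- Nat.toDigits through Nat.digits
lemma toDigitsCore_digits (f : Nat) : ∀ (n : Nat) (ds : List Char), 0 < n → n < 10 ^ f →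
    Nat.toDigitsCore 10 f n ds = ((Nat.digits 10 n).map Nat.digitChar).reverse ++ ds := by
  induction f with
  | zero => intro n ds hn hf; omega
  | succ f ih =>
    intro n ds hn hf
    rw [Nat.toDigitsCore]
    by_cases h : n / 10 = 0
    · have hlt : n < 10 := by omega
      rw [Nat.digits_def' (by norm_num : 1 < 10) hn, h]
      simp [Nat.mod_eq_of_lt hlt]
    · simp only [h, if_false]
      rw [ih (n / 10) _ (by omega) (by
        have : n < 10 ^ f * 10 := by rw [← pow_succ]; exact hf
        omega)]
      rw [Nat.digits_def' (by norm_num : 1 < 10) hn]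
      simp

lemma toDigits_eq_digits (n : Nat) (hn : 0 < n) :
    Nat.toDigits 10 n = ((Nat.digits 10 n).map Nat.digitChar).reverse := by
  rw [Nat.toDigits]
  have h1 : n < 10 ^ n := Nat.lt_pow_self (by norm_num : (1:Nat) < 10)
  have h2 : (10:Nat) ^ n ≤ 10 ^ (n+1) := Nat.pow_le_pow_right (by norm_num) (by omega)
  rw [toDigitsCore_digits (n + 1) n [] hn (lt_of_lt_of_le h1 h2)]
  simp

lemma tCN_length_of_pos (n : Nat) (hn : 0 < n) : (tCN n).length = (Nat.digits 10 n).length := by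
  unfold tCN
  rw [toDigits_eq_digits n hn]
  simp

-- one decimal step of str(n)
lemma tCN_step (m r : Nat) (hr : r < 10) (h : 0 < 10 * m + r) :
    tCN (10 * m + r) = (if m = 0 then [] else tCN m) ++ [Nat.digitChar r] := by
  unfold tCN
  rw [toDigits_eq_digits _ h]
  rw [Nat.digits_def' (by norm_num : 1 < 10) h]
  have hmod : (10 * m + r) % 10 = r := by omega
  have hdiv : (10 * m + r) / 10 = m := by omega
  rw [hmod, hdiv]
  by_cases hm : m = 0
  · simp [hm]
  · rw [toDigits_eq_digits m (by omega)]
    simp [hm]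

-- every all-digit LSB-first list is the digit expansion of its value, padded with zeros
lemma digits_pad (e : List Char) (he : ∀ c ∈ e, PySem.Chars.isdigit c = true) :
    e = (Nat.digits 10 (VR e)).map Nat.digitChar
          ++ List.replicate (e.length - (Nat.digits 10 (VR e)).length) '0' := by
  induction e with
  | nil => simp [VR]
  | cons c e ih =>
    have hc := he c List.mem_cons_self
    have he' : ∀ x ∈ e, PySem.Chars.isdigit x = true :=
      fun x hx => he x (List.mem_cons_of_mem _ hx)
    have hd9 := digitN_le_nine c hc
    have hvc : VR (c :: e) = 10 * VR e + digitN c := by simp only [VR]; omega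
    by_cases hz : VR (c :: e) = 0
    · have hd0 : digitN c = 0 := by omega
      have hv0 : VR e = 0 := by omega
      have hc0 : c = '0' := by
        rcases digit_enum c hc with rfl|rfl|rfl|rfl|rfl|rfl|rfl|rfl|rfl|rfl <;>
          first | rfl | (exfalso; revert hd0; decide)
      have ihe := ih he'
      rw [hv0] at ihe
      simp only [Nat.digits_zero, List.map_nil, List.length_nil, Nat.sub_zero,
        List.nil_append] at ihe
      rw [hz, hc0]
      simp only [Nat.digits_zero, List.map_nil, List.length_nil, Nat.sub_zero,
        List.nil_append, List.length_cons]
      rw [List.replicate_succ]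
      exact congrArg _ ihe
    · rw [hvc]
      rw [Nat.digits_def' (by norm_num : 1 < 10) (by omega)]
      have hmod : (10 * VR e + digitN c) % 10 = digitN c := by omega
      have hdiv : (10 * VR e + digitN c) / 10 = VR e := by omega
      rw [hmod, hdiv, List.map_cons, List.cons_append]
      congr 1
      · exact (digitChar_digitN c hc).symm
      · have harith : (c :: e).length - ((Nat.digits 10 (VR e)).length + 1)
            = e.length - (Nat.digits 10 (VR e)).length := by
          simp only [List.length_cons]; omega
        have : (e.length + 1) - ((digitN c :: Nat.digits 10 (VR e)).length)
            = e.length - (Nat.digits 10 (VR e)).length := by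
          simp only [List.length_cons]; omega
        rw [List.length_cons, this]
        exact ih he'

-- padding a positive value back to its zero-padded representation (MSB side)
lemma pad_digits (e : List Char) (he : ∀ c ∈ e, PySem.Chars.isdigit c = true)
    (hv : 0 < VR e) :
    e.reverse.take (e.length - (tCN (VR e)).length) ++ tCN (VR e) = e.reverse := by
  have hT := digits_pad e he
  set D := (Nat.digits 10 (VR e)).map Nat.digitChar with hD
  set k := e.length - (Nat.digits 10 (VR e)).length with hk
  have htc : tCN (VR e) = D.reverse := by
    rw [tCN, toDigits_eq_digits _ hv, hD]
  have hDlen : D.length = (Nat.digits 10 (VR e)).length := by simp [hD]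
  have hlen : e.length = D.length + k := by
    have := congrArg List.length hT
    simp only [List.length_append, List.length_replicate] at this
    omega
  have hrev : e.reverse = List.replicate k '0' ++ D.reverse := by
    rw [hT]
    simp
  rw [htc, hrev]
  have htk : e.length - D.reverse.length = k := by
    simp only [List.length_reverse]; omega
  rw [htk]
  rw [List.take_append_of_le_length (by simp)]
  simp

-- the carry loop, characterized through parse-increment-print
lemma bLoop_carry (e uR : List Char) (he : ∀ c ∈ e, PySem.Chars.isdigit c = true)
    (hu : ∀ c, uR.head? = some c → PySem.Chars.isdigit c = false) :
    bLoop (e ++ uR)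
      = (e.reverse.take (e.length - (tCN (VR e + 1)).length) ++ tCN (VR e + 1)).reverse ++ uR := by
  induction e with
  | nil =>
    have h1 : tCN (VR [] + 1) = ['1'] := by decide
    rw [h1]
    cases uR with
    | nil => simp [bLoop]
    | cons c u' =>
      have hc : PySem.Chars.isdigit c = false := hu c rfl
      simp [bLoop, hc]
  | cons c e' ih =>
    have hc := he c List.mem_cons_self
    have he' : ∀ x ∈ e', PySem.Chars.isdigit x = true :=
      fun x hx => he x (List.mem_cons_of_mem _ hx)
    have hd9 := digitN_le_nine c hc
    by_cases h9 : c = '9'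
    · subst h9
      have hv : VR ('9' :: e') + 1 = 10 * (VR e' + 1) := by
        have h9v : digitN '9' = 9 := rfl
        simp only [VR]; omega
      have htc : tCN (VR ('9' :: e') + 1) = tCN (VR e' + 1) ++ ['0'] := by
        have hstep := tCN_step (VR e' + 1) 0 (by norm_num) (by omega)
        rw [Nat.add_zero] at hstep
        rw [hv, hstep, if_neg (by omega)]
        rfl
      have hbl : bLoop ('9' :: (e' ++ uR)) = '0' :: bLoop (e' ++ uR) := rfl
      rw [List.cons_append, hbl, ih he', htc]
      have hLpos : 0 < (tCN (VR e' + 1)).length :=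
        List.length_pos_iff.mpr (tCN_ne_nil _)
      have harith : ('9' :: e').length - ((tCN (VR e' + 1) ++ ['0']).length)
          = e'.length - (tCN (VR e' + 1)).length := by
        simp only [List.length_cons, List.length_append, List.length_nil]
        omega
      rw [harith]
      have htake : ('9' :: e').reverse.take (e'.length - (tCN (VR e' + 1)).length)
          = e'.reverse.take (e'.length - (tCN (VR e' + 1)).length) := by
        rw [List.reverse_cons]
        exact List.take_append_of_le_length (by rw [List.length_reverse]; omega)
      rw [htake]
      simp [List.reverse_append]
    · -- a digit below '9': bump it, no carry
      have hbl : bLoop (c :: (e' ++ uR)) = Char.ofNat (c.toNat + 1) :: (e' ++ uR) := by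
        simp [bLoop, hc, h9]
      rw [List.cons_append, hbl]
      have hd8 : digitN c ≤ 8 := by
        rcases digit_enum c hc with rfl|rfl|rfl|rfl|rfl|rfl|rfl|rfl|rfl|rfl <;>
          first | decide | exact absurd rfl h9
      have hv : VR (c :: e') + 1 = 10 * VR e' + (digitN c + 1) := by
        simp only [VR]; omega
      have htc : tCN (VR (c :: e') + 1)
          = (if VR e' = 0 then [] else tCN (VR e')) ++ [Nat.digitChar (digitN c + 1)] := by
        rw [hv, tCN_step (VR e') (digitN c + 1) (by omega) (by omega)]
      have hchar : Nat.digitChar (digitN c + 1) = Char.ofNat (c.toNat + 1) :=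
        digitChar_succ c hc h9
      by_cases hv0 : VR e' = 0
      · rw [htc, if_pos hv0, List.nil_append]
        have hL : ([Nat.digitChar (digitN c + 1)] : List Char).length = 1 := rfl
        have htake : (c :: e').reverse.take ((c :: e').length - 1) = e'.reverse := by
          rw [List.reverse_cons]
          rw [List.length_cons]
          rw [Nat.add_sub_cancel]
          rw [List.take_append_of_le_length (by simp)]
          simp
        rw [hL, htake, hchar]
        simp
      · rw [htc, if_neg hv0]
        have hLv : (tCN (VR e')).length ≤ e'.length := by
          have h1 : (tCN (VR e')).length = (Nat.digits 10 (VR e')).length :=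
            tCN_length_of_pos _ (by omega)
          have h2 : VR e' < 10 ^ e'.length := VR_lt e' he'
          rw [h1]
          exact (Nat.digits_length_le_iff (by norm_num) _).mpr h2
        have harith2 : (c :: e').length - ((tCN (VR e')
              ++ [Nat.digitChar (digitN c + 1)]).length)
            = e'.length - (tCN (VR e')).length := by
          simp only [List.length_cons, List.length_append, List.length_nil]
          omega
        rw [harith2]
        have htake : (c :: e').reverse.take (e'.length - (tCN (VR e')).length)
            = e'.reverse.take (e'.length - (tCN (VR e')).length) := by
          rw [List.reverse_cons]
          exact List.take_append_of_le_length (by rw [List.length_reverse]; omega)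
        rw [htake]
        rw [← List.append_assoc]
        rw [pad_digits e' he' (by omega)]
        rw [hchar]
        simp

-- ---- A-side machinery (the backward index loop) ----

-- the descending range of A's loop
def Rm (m : Nat) : List Int := (List.range m).map (fun k => ((m - k : Nat) : Int))

lemma pyRange_down (len : Nat) (h : 1 ≤ len) :
    PySem.List.pyRange ((len : Int) - 1) 0 (-1) = Rm (len - 1) := by
  unfold PySem.List.pyRange Rm
  by_cases h2 : 2 ≤ len
  · have hlt : (0 : Int) < (len : Int) - 1 := by omega
    simp only [hlt, if_pos, if_neg (by norm_num : ¬ ((-1 : Int) = 0)),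
      if_neg (by norm_num : ¬ ((0:Int) < -1))]
    have hc : (((len : Int) - 1 - 0 + - -1 - 1) / - -1).toNat = len - 1 := by
      have hd : ((len : Int) - 1 - 0 + - -1 - 1) / - -1 = (len : Int) - 1 := by norm_num
      rw [hd]; omega
    rw [hc]
    apply List.map_congr_left
    intro k hk
    rw [List.mem_range] at hk
    omega
  · have h1 : len = 1 := by omega
    subst h1
    norm_num

lemma Rm_succ (m : Nat) : Rm (m + 1) = ((m + 1 : Nat) : Int) :: Rm m := by
  unfold Rm
  rw [List.range_succ_eq_map, List.map_cons, List.map_map]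
  congr 1
  apply List.map_congr_left
  intro k _
  simp [Nat.succ_sub_succ]

-- A's loop: scanning i = m, m-1, …, 1, positions above b are digits, position b breaks
lemma incLoopA_spec (cs : List Char) (b : Nat) :
    ∀ (m si : Nat), m < cs.length →
    (∀ i, b < i → i ≤ m → PySem.Chars.isdigit (cs.getD i ' ') = true) →
    (b = 0 ∨ PySem.Chars.isdigit (cs.getD b ' ') = false) → b ≤ m →
    incLoopA cs (Rm m) si = si - (m - b) := by
  intro m
  induction m with
  | zero =>
    intro si _ _ _ hbm
    have : b = 0 := by omega
    simp [Rm, incLoopA, this]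
  | succ m ih =>
    intro si hm hdig hb hbm
    rw [Rm_succ]
    unfold incLoopA
    rw [PySem.List.pyGet?_natCast, ← List.getD_eq_getElem?_getD]
    by_cases hbe : b = m + 1
    · have hfalse : PySem.Chars.isdigit (cs.getD (m + 1) ' ') = false := by
        rcases hb with h0 | hf
        · omega
        · rw [← hbe]; exact hf
      rw [hfalse]
      simp [hbe]
    · have hble : b ≤ m := by omega
      have htrue : PySem.Chars.isdigit (cs.getD (m + 1) ' ') = true :=
        hdig (m + 1) (by omega) (le_refl _)
      rw [htrue]
      simp only [Bool.true_eq_false, if_false]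
      rw [ih (si - 1) (by omega) (fun i h1 h2 => hdig i h1 (by omega)) hb hble]
      omega

-- the trailing-run decomposition of a string
lemma split_eq (cs : List Char) :
    (cs.reverse.dropWhile PySem.Chars.isdigit).reverse
      ++ (cs.reverse.takeWhile PySem.Chars.isdigit).reverse = cs := by
  rw [← List.reverse_append, List.takeWhile_append_dropWhile, List.reverse_reverse]

lemma run_digits (cs : List Char) {c : Char}
    (hc : c ∈ (cs.reverse.takeWhile PySem.Chars.isdigit).reverse) :
    PySem.Chars.isdigit c = true :=
  List.mem_takeWhile_imp (List.mem_reverse.mp hc)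

-- A's loop over range(len-1, 0, -1) ends at the break position
lemma loop_run (cs : List Char) (hpos : 0 < cs.length) :
    incLoopA cs (Rm (cs.length - 1)) cs.length
      = max (cs.reverse.dropWhile PySem.Chars.isdigit).length 1 := by
  set u := cs.reverse.dropWhile PySem.Chars.isdigit with hu
  set t := cs.reverse.takeWhile PySem.Chars.isdigit with ht
  have hsplit : u.reverse ++ t.reverse = cs := split_eq cs
  have hlen : cs.length = u.length + t.length := by
    rw [← hsplit]; simp
  by_cases hp : u.length = 0
  · -- all digits: the loop runs down to i = 1
    have hres := incLoopA_spec cs 0 (cs.length - 1) cs.length (by omega)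
      (by
        intro i h1 h2
        have hilt : i < cs.length := by omega
        rw [List.getD_eq_getElem _ _ hilt]
        have hun : u.reverse = [] := by
          simpa using List.eq_nil_of_length_eq_zero hp
        have hilt' : i < (u.reverse ++ t.reverse).length := by rw [hsplit]; exact hilt
        rw [List.getElem_of_eq hsplit.symm hilt]
        apply run_digits cs
        rw [List.getElem_append_right (by rw [hun]; simp)]
        exact List.getElem_mem _)
      (Or.inl rfl) (by omega)
    rw [hres, hp]
    omega
  · -- a non-digit at position u.length - 1 breaks the loop
    have hppos : 0 < u.length := by omega
    have hune : u ≠ [] := by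
      intro h; rw [h] at hppos; simp at hppos
    have hres := incLoopA_spec cs (u.length - 1) (cs.length - 1) cs.length (by omega)
      (by
        intro i h1 h2
        have hilt : i < cs.length := by omega
        rw [List.getD_eq_getElem _ _ hilt]
        rw [List.getElem_of_eq hsplit.symm hilt]
        apply run_digits cs
        have hip : u.reverse.length ≤ i := by simp; omega
        rw [List.getElem_append_right hip]
        exact List.getElem_mem _)
      (by
        right
        have hplt : u.length - 1 < cs.length := by omega
        rw [List.getD_eq_getElem _ _ hplt]
        rw [List.getElem_of_eq hsplit.symm hplt]
        have hpl : u.length - 1 < u.reverse.length := by simp; omega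
        rw [List.getElem_append_left hpl]
        rw [List.getElem_reverse]
        have h0 : u.length - 1 - (u.length - 1) = 0 := by omega
        simp only [h0]
        rw [List.getElem_zero]
        exact List.head_dropWhile_not _ hune)
      (by omega)
    rw [hres]
    omega

-- ---- B characterized in the vocabulary of the main proof ----

-- B when the string has no trailing digit (covers the empty string)
lemma alt_norun (s : String)
    (ht : s.toList.reverse.takeWhile PySem.Chars.isdigit = []) :
    increment_string_alt s = s ++ "1" := by
  have hu : ∀ c, (s.toList.reverse).head? = some c → PySem.Chars.isdigit c = false := by
    intro c hc
    conv at hc => rw [← List.takeWhile_append_dropWhile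
      (p := PySem.Chars.isdigit) (l := s.toList.reverse), ht, List.nil_append]
    have h := List.head?_dropWhile_not PySem.Chars.isdigit s.toList.reverse
    rw [hc] at h
    exact h
  have hb := bLoop_carry [] s.toList.reverse (by simp) hu
  rw [List.nil_append] at hb
  have h1 : tCN (VR [] + 1) = ['1'] := by decide
  rw [h1] at hb
  simp only [List.reverse_nil, List.length_nil, List.take_nil, List.nil_append] at hb
  unfold increment_string_alt
  rw [hb]
  have h2 : (s ++ "1").toList = s.toList ++ ['1'] := by simp
  rw [← String.ofList_toList (s := s ++ "1"), h2]
  simp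

-- B when the string has a trailing digit run
lemma alt_run (s : String)
    (_ht : s.toList.reverse.takeWhile PySem.Chars.isdigit ≠ []) :
    increment_string_alt s =
      String.ofList ((s.toList.reverse.dropWhile PySem.Chars.isdigit).reverse
        ++ (s.toList.reverse.takeWhile PySem.Chars.isdigit).reverse.take
            ((s.toList.reverse.takeWhile PySem.Chars.isdigit).length
              - (tCN (VR (s.toList.reverse.takeWhile PySem.Chars.isdigit) + 1)).length)
        ++ tCN (VR (s.toList.reverse.takeWhile PySem.Chars.isdigit) + 1)) := by
  set t := s.toList.reverse.takeWhile PySem.Chars.isdigit with htdef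
  set u := s.toList.reverse.dropWhile PySem.Chars.isdigit with hudef
  have hsplit : t ++ u = s.toList.reverse := List.takeWhile_append_dropWhile
  have he : ∀ c ∈ t, PySem.Chars.isdigit c = true :=
    fun c hc => List.mem_takeWhile_imp hc
  have hu : ∀ c, u.head? = some c → PySem.Chars.isdigit c = false := by
    intro c hc
    have h := List.head?_dropWhile_not PySem.Chars.isdigit s.toList.reverse
    rw [← hudef, hc] at h
    exact h
  have hb := bLoop_carry t u he hu
  unfold increment_string_alt
  rw [← hsplit, hb]
  simp [List.reverse_append, List.append_assoc]

-- ===== VERDICT (by name: the statement is the Claim_ definition above) =====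
theorem increment_string_spec : Claim_unchanged_increment_string := by
  intro s _ hnD
  show increment_string s = increment_string_alt s
  by_cases htn : s.toList.reverse.takeWhile PySem.Chars.isdigit = []
  · -- no trailing digit (also the empty string): both append '1'
    rw [alt_norun s htn]
    rw [increment_string]
    by_cases hnil : s.toList = []
    · have hs : s = "" := String.toList_inj.mp (by rw [hnil]; rfl)
      subst hs
      decide
    · obtain ⟨c, r, hrev⟩ : ∃ c r, s.toList.reverse = c :: r := by
        cases hr : s.toList.reverse with
        | nil => exact absurd (by simpa using congrArg List.reverse hr) hnil
        | cons c r => exact ⟨c, r, rfl⟩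
      have hcd : PySem.Chars.isdigit c = false := by
        by_contra hcon
        have : s.toList.reverse.takeWhile PySem.Chars.isdigit
            = c :: (r.takeWhile PySem.Chars.isdigit) := by
          rw [hrev, List.takeWhile_cons_of_pos (by simpa using hcon)]
        rw [htn] at this
        exact (List.cons_ne_nil _ _) this.symm
      have hlast : (PySem.List.pyGet? s.toList (-1)).getD ' ' = c := by
        rw [PySem.List.pyGet?_neg_one, ← List.head?_reverse, hrev]; rfl
      have hl0 : ¬ s.toList.length = 0 := fun h => hnil (List.eq_nil_of_length_eq_zero h)
      rw [if_neg hl0]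
      rw [hlast, hcd]
      simp
  · -- a trailing digit run exists
    rw [alt_run s htn, increment_string]
    set cs := s.toList with hcs
    set t := cs.reverse.takeWhile PySem.Chars.isdigit with htdef
    set u := cs.reverse.dropWhile PySem.Chars.isdigit with hudef
    have hsplit : u.reverse ++ t.reverse = cs := split_eq cs
    have hlen : cs.length = u.length + t.length := by
      rw [← hsplit]; simp
    have htpos : 0 < t.length := List.length_pos_iff.mpr htn
    obtain ⟨c, r, hrev⟩ : ∃ c r, cs.reverse = c :: r := by
      cases hr : cs.reverse with
      | nil =>
        exfalso
        rw [htdef, hr] at htn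
        exact htn rfl
      | cons c r => exact ⟨c, r, rfl⟩
    have hcd : PySem.Chars.isdigit c = true := by
      by_contra hcon
      have : t = [] := by
        rw [htdef, hrev, List.takeWhile_cons_of_neg (by simpa using hcon)]
      exact htn this
    have hlast : (PySem.List.pyGet? cs (-1)).getD ' ' = c := by
      rw [PySem.List.pyGet?_neg_one, ← List.head?_reverse, hrev]; rfl
    have hlpos : 0 < cs.length := by
      rcases Nat.eq_zero_or_pos cs.length with h | h
      · exfalso
        have : cs.reverse = [] := by
          rw [List.eq_nil_of_length_eq_zero h]; rfl
        rw [this] at hrev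
        exact (List.cons_ne_nil _ _) hrev.symm
      · exact h
    rw [if_neg (by omega : ¬ cs.length = 0)]
    rw [hlast, hcd]
    rw [if_neg (by simp)]
    set N := VR t + 1 with hN
    set L := (tCN N).length with hL
    have hnum : intDigits t.reverse + 1 = ((N : Nat) : Int) := by
      rw [intDigits_eq_VR, hN]
      push_cast
      ring
    have htoc : PySem.Int.toChars ((N : Nat) : Int) = tCN N := toChars_natCast N
    have hLpos : 0 < L := by
      rw [hL]
      exact List.length_pos_iff.mpr (tCN_ne_nil N)
    by_cases hone : cs.length = 1
    · -- single digit character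
      rw [if_pos hone]
      have hu0 : u.length = 0 := by omega
      have ht1 : t.length = 1 := by omega
      have hurev : u.reverse = [] := by
        simpa using List.eq_nil_of_length_eq_zero hu0
      have hts : t.reverse = cs := by rw [← hsplit, hurev, List.nil_append]
      have htake : t.reverse.take (t.length - L) = [] := by
        have : t.length - L = 0 := by omega
        simp [this]
      rw [htake, hurev]
      rw [← hts, hnum]
      conv_lhs => rw [← String.ofList_toList
        (s := PySem.Int.toStr ((N : Nat) : Int))]
      rw [PySem.Int.toList_toStr, htoc]
      simp
    · -- length ≥ 2, and not all digits (else D_ would hold)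
      rw [if_neg hone]
      have hlen2 : 2 ≤ cs.length := by omega
      have hnall : cs.all PySem.Chars.isdigit = false := by
        by_contra hcon
        exact hnD ⟨by rw [← hcs]; omega, by rw [← hcs]; simpa using hcon⟩
      have hup : 0 < u.length := by
        rcases Nat.eq_zero_or_pos u.length with h | h
        · exfalso
          have hurev : u.reverse = [] := by
            simpa using List.eq_nil_of_length_eq_zero h
          have hts : t.reverse = cs := by rw [← hsplit, hurev, List.nil_append]
          have : cs.all PySem.Chars.isdigit = true := by
            rw [← hts, List.all_reverse]
            exact List.all_eq_true.mpr (fun x hx => List.mem_takeWhile_imp hx)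
          rw [this] at hnall
          exact Bool.true_eq_false ▸ hnall
        · exact h
      dsimp only
      -- the loop result
      rw [pyRange_down cs.length (by omega), loop_run cs (by omega)]
      have hmax : max u.length 1 = u.length := by omega
      rw [hmax]
      -- whole string is not all digits
      have hsd : PySem.Str.strIsdigit s = false := by
        rw [PySem.Str.strIsdigit_eq, ← hcs]
        unfold PySem.Chars.strIsdigit
        simp [hnall]
      rw [hsd]
      rw [if_pos rfl]
      -- the sliced suffix is the digit run
      have hsuf : PySem.List.slice cs (some ((u.length : Nat) : Int)) none = t.reverse := by
        rw [PySem.List.slice_from _ (Int.natCast_nonneg _)]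
        simp only [Int.toNat_natCast]
        rw [← hsplit, List.drop_left' (by simp)]
      rw [hsuf, hnum, htoc, ← hL]
      have hktr : t.reverse.length = t.length := List.length_reverse
      by_cases hLk : L < t.length
      · rw [if_pos (by rw [hktr]; omega : (0 : Int) < ↑t.reverse.length - ↑L)]
        have hbound : ((u.length : Int) + (↑t.reverse.length - ↑L))
            = ((u.length + (t.length - L) : Nat) : Int) := by
          rw [hktr]; push_cast; omega
        rw [hbound, PySem.List.slice_to _ (Int.natCast_nonneg _), Int.toNat_natCast]
        rw [List.take_add]
        rw [← hsplit, List.take_left' (by simp), List.drop_left' (by simp)]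
      · rw [if_neg (by rw [hktr]; omega : ¬ (0 : Int) < ↑t.reverse.length - ↑L)]
        have htake : t.reverse.take (t.length - L) = [] := by
          have : t.length - L = 0 := by omega
          simp [this]
        rw [htake, List.append_nil]
        rw [add_zero, PySem.List.slice_to _ (by positivity), Int.toNat_natCast]
        rw [← hsplit, List.take_left' (by simp)]

theorem increment_string_changed : Claim_changed_increment_string := by
  unfold Claim_changed_increment_string; decide

theorem increment_string_tight : Claim_exact_increment_string := by
  intro s _ hD
  obtain ⟨hlen2, hall⟩ := hD
  show increment_string s ≠ increment_string_alt s
  set cs := s.toList with hcs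
  set t := cs.reverse.takeWhile PySem.Chars.isdigit with htdef
  set u := cs.reverse.dropWhile PySem.Chars.isdigit with hudef
  have hsplit : u.reverse ++ t.reverse = cs := split_eq cs
  have hlen : cs.length = u.length + t.length := by
    rw [← hsplit]; simp
  have hu0 : u = [] := by
    rw [hudef, List.dropWhile_eq_nil_iff]
    intro x hx
    exact List.all_eq_true.mp hall x (List.mem_reverse.mp hx)
  have hurev : u.reverse = [] := by rw [hu0]; rfl
  have hu0len : u.length = 0 := by rw [hu0]; rfl
  have hts : t.reverse = cs := by rw [← hsplit, hurev, List.nil_append]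
  have htlen : t.length = cs.length := by omega
  have htn : t ≠ [] := by
    intro h
    have : t.length = 0 := by rw [h]; rfl
    omega
  rw [alt_run s htn, increment_string]
  set N := VR t + 1 with hN
  set L := (tCN N).length with hL
  have hnum : intDigits t.reverse + 1 = ((N : Nat) : Int) := by
    rw [intDigits_eq_VR, hN]
    push_cast
    ring
  have htoc : PySem.Int.toChars ((N : Nat) : Int) = tCN N := toChars_natCast N
  have hLpos : 0 < L := by
    rw [hL]
    exact List.length_pos_iff.mpr (tCN_ne_nil N)
  obtain ⟨c, r, hrev⟩ : ∃ c r, cs.reverse = c :: r := by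
    cases hr : cs.reverse with
    | nil =>
      exfalso
      have : cs.length = 0 := by
        have := congrArg List.length hr
        simpa using this
      omega
    | cons c r => exact ⟨c, r, rfl⟩
  have hcmem : c ∈ cs := List.mem_reverse.mp (by rw [hrev]; exact List.mem_cons_self)
  have hcd : PySem.Chars.isdigit c = true := List.all_eq_true.mp hall c hcmem
  have hlast : (PySem.List.pyGet? cs (-1)).getD ' ' = c := by
    rw [PySem.List.pyGet?_neg_one, ← List.head?_reverse, hrev]; rfl
  rw [← hcs, ← htdef, ← hudef]
  rw [if_neg (by omega : ¬ cs.length = 0)]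
  rw [hlast, hcd]
  rw [if_neg (by simp : ¬ (true = false))]
  rw [if_neg (by omega : ¬ cs.length = 1)]
  dsimp only
  rw [pyRange_down cs.length (by omega), loop_run cs (by omega)]
  have hmax : max u.length 1 = 1 := by omega
  rw [hmax]
  have hsd : PySem.Str.strIsdigit s = true := by
    rw [PySem.Str.strIsdigit_eq, ← hcs]
    unfold PySem.Chars.strIsdigit
    have hne : cs.isEmpty = false := by
      rw [List.isEmpty_eq_false_iff]
      intro h
      have hlc : cs.length = 0 := by rw [h]; rfl
      omega
    simp [hne, hall]
  rw [hsd]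
  rw [if_neg (by simp : ¬ (true = false))]
  have hsuf : PySem.List.slice cs (some ((0 : Int))) none = t.reverse := by
    rw [PySem.List.slice_from _ (by norm_num)]
    rw [hts]
    rfl
  rw [hsuf, hnum, htoc, ← hL]
  have hktr : t.reverse.length = t.length := List.length_reverse
  intro heq
  have hlists := String.toList_inj.mpr heq
  rw [String.toList_ofList, String.toList_ofList] at hlists
  have hlenseq := congrArg List.length hlists
  simp only [List.length_append, List.length_take, hurev, List.nil_append] at hlenseq
  by_cases hLk : L < t.length
  · rw [if_pos (by rw [hktr]; omega : (0 : Int) < ↑t.reverse.length - ↑L)] at hlenseq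
    have hbound : (((1 : Nat) : Int) + ((t.reverse.length : Int) - (L : Int)))
        = ((1 + (t.length - L) : Nat) : Int) := by
      rw [hktr]; push_cast; omega
    rw [hbound, PySem.List.slice_to _ (Int.natCast_nonneg _), Int.toNat_natCast] at hlenseq
    simp only [List.length_take] at hlenseq
    rw [hktr] at hlenseq
    have hcl : cs.length = t.length := by omega
    rw [hcl] at hlenseq
    omega
  · rw [if_neg (by rw [hktr]; omega : ¬ (0 : Int) < ↑t.reverse.length - ↑L)] at hlenseq
    rw [add_zero, PySem.List.slice_to _ (Int.natCast_nonneg _), Int.toNat_natCast] at hlenseq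
    simp only [List.length_take] at hlenseq
    rw [hktr] at hlenseq
    have hcl : cs.length = t.length := by omega
    rw [hcl] at hlenseq
    omega
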